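-- pv_equiv track=rewrite | github.com/jjoshua2/arc_agi | unsolved/2025-10-12T19-20-45Z/e5062a87_best1.py | transform
-- ===== SOURCE A (Python) =====
-- def get_two_components(grid):
--     h = len(grid)
--     w = len(grid[0])
--     visited = [[False] * w for _ in range(h)]
--     components = []
--     directions = [(dx, dy) for dx in [-1, 0, 1] for dy in [-1, 0, 1] if not (dx == 0 and dy == 0)]
--     for i in range(h):
--         for j in range(w):
--             if grid[i][j] == 2 and not visited[i][j]:
--                 component = []
--                 stack = [(i, j)]
--                 visited[i][j] = True
--                 while stack:
--                     x, y = stack.pop()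
--                     component.append((x, y))
--                     for dx, dy in directions:
--                         nx, ny = x + dx, y + dy
--                         if 0 <= nx < h and 0 <= ny < w and not visited[nx][ny] and grid[nx][ny] == 2:
--                             visited[nx][ny] = True
--                             stack.append((nx, ny))
--                 components.append(component)
--     return components
--
-- def transform(grid_lst):
--     if not grid_lst:
--         return []
--     h = len(grid_lst)
--     w = len(grid_lst[0])
--     two_comps = get_two_components(grid_lst)
--     out = [row[:] for row in grid_lst]
--     for comp in two_comps:
--         if not comp:
--             continue
--         min_r = min(r for r, c in comp)
--         min_c = min(c for r, c in comp)
--         shape = frozenset((r - min_r, c - min_c) for r, c in comp)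
--         for i in range(h):
--             for j in range(w):
--                 match = True
--                 positions = []
--                 for dr, dc in shape:
--                     nr = i + dr
--                     nc = j + dc
--                     if not (0 <= nr < h and 0 <= nc < w and grid_lst[nr][nc] == 0):
--                         match = False
--                         break
--                     positions.append((nr, nc))
--                 if match:
--                     for pr, pc in positions:
--                         out[pr][pc] = 2
--     return out
-- ===== SOURCE B (Python) =====
-- def get_two_components(grid):
--     h = len(grid)
--     w = len(grid[0])
--     visited = [[False] * w for _ in range(h)]
--     components = []
--     directions = [(dx, dy) for dx in [-1, 0, 1] for dy in [-1, 0, 1] if not (dx == 0 and dy == 0)]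
--     for i in range(h):
--         for j in range(w):
--             if grid[i][j] == 2 and not visited[i][j]:
--                 component = []
--                 stack = [(i, j)]
--                 visited[i][j] = True
--                 while stack:
--                     x, y = stack.pop()
--                     component.append((x, y))
--                     for dx, dy in directions:
--                         nx, ny = x + dx, y + dy
--                         if 0 <= nx < h and 0 <= ny < w and not visited[nx][ny] and grid[nx][ny] == 2:
--                             visited[nx][ny] = True
--                             stack.append((nx, ny))
--                 components.append(component)
--     return components
--
--
-- def transform(grid_lst):
--     if not grid_lst:
--         return []
--     h = len(grid_lst)
--     w = len(grid_lst[0])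
--     zeros = {(r, c) for r in range(h) for c in range(w) if grid_lst[r][c] == 0}
--     fill = set()
--     for comp in get_two_components(grid_lst):
--         r0 = min(r for r, _ in comp)
--         c0 = min(c for _, c in comp)
--         offs = [(r - r0, c - c0) for r, c in comp]
--         # anchors = cells where every shifted copy of the shape lands on a zero cell:
--         # the intersection of the zero set shifted back by each offset
--         anchors = None
--         for dr, dc in offs:
--             shifted = {(r - dr, c - dc) for r, c in zeros}
--             anchors = shifted if anchors is None else anchors & shifted
--         for i, j in anchors:
--             for dr, dc in offs:
--                 fill.add((i + dr, j + dc))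
--     return [[2 if (r, c) in fill else v for c, v in enumerate(row)]
--             for r, row in enumerate(grid_lst)]
-- ===== Notes on version B (the rewrite author's own statement) =====
-- stated objective: faster
-- what changed: Placement matching is recast as set algebra: B builds the set of zero cells once and computes each shape's valid anchors as the intersection of back-shifted copies of that zero set (a set-correlation, per the cross-correlation hint), collects all filled cells in one set, and rebuilds the grid in a single pure pass instead of A's per-anchor inner scan over all h*w cells with in-place writes.
import Mathlib
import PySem

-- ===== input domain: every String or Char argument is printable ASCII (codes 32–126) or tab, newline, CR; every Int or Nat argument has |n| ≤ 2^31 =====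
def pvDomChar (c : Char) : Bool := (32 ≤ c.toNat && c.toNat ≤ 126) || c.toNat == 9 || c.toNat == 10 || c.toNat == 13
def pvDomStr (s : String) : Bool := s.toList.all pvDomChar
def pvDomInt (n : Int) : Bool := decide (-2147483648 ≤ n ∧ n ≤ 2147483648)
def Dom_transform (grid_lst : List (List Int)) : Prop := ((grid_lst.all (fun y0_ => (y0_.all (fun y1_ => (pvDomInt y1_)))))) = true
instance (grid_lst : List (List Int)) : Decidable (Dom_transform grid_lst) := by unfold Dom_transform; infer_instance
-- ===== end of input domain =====

-- B replaces A's per-anchor inner scan by set algebra on a zero-cell set (anchors = intersection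
-- of back-shifted zero sets) and a single pure rebuild pass; alternative algorithm, same results.

-- ===== PORT A =====
-- grid cell access grid[i][j]; both ports only evaluate it at in-bounds indices, where it is exact
def pvAt (g : List (List Int)) (i j : Int) : Int :=
  (PySem.List.pyGet? ((PySem.List.pyGet? g i).getD []) j).getD 0

def pvDirs : List (Int × Int) :=
  [(-1, -1), (-1, 0), (-1, 1), (0, -1), (0, 1), (1, -1), (1, 0), (1, 1)]

-- A's DFS while-loop (visited kept as the set of visited cells); fuel h*w+1 bounds the number of
-- pops (every pushed cell is freshly marked visited, so at most h*w cells are ever pushed)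
def pvDfs (g : List (List Int)) (h w : Int) :
    Nat → List (Int × Int) → List (Int × Int) → List (Int × Int) →
    List (Int × Int) × List (Int × Int)
  | 0, _, vis, comp => (comp, vis)
  | _ + 1, [], vis, comp => (comp, vis)
  | fuel + 1, p :: rest, vis, comp =>
      let sv := pvDirs.foldl (fun (sv : List (Int × Int) × List (Int × Int)) d =>
          let nx := p.1 + d.1
          let ny := p.2 + d.2
          if 0 ≤ nx ∧ nx < h ∧ 0 ≤ ny ∧ ny < w ∧ ¬ (nx, ny) ∈ sv.2 ∧ pvAt g nx ny = 2
          then ((nx, ny) :: sv.1, (nx, ny) :: sv.2) else sv) (rest, vis)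
      pvDfs g h w fuel sv.1 sv.2 (comp ++ [p])

-- get_two_components
def pvComponents (g : List (List Int)) : List (List (Int × Int)) :=
  let h : Int := g.length
  let w : Int := (g.headD []).length
  ((PySem.List.pyRange 0 h).foldl (fun st i =>
    (PySem.List.pyRange 0 w).foldl
      (fun (st : List (List (Int × Int)) × List (Int × Int)) j =>
        if pvAt g i j = 2 ∧ ¬ (i, j) ∈ st.2 then
          let r := pvDfs g h w (g.length * (g.headD []).length + 1) [(i, j)] ((i, j) :: st.2) []
          (st.1 ++ [r.1], r.2)
        else st) st) ([], [])).1

-- A's inner shape loop: positions if every cell of the placed shape is an in-bounds zero, else none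
def pvCheck (g : List (List Int)) (h w : Int) (i j : Int) :
    List (Int × Int) → List (Int × Int) → Option (List (Int × Int))
  | [], acc => some acc
  | d :: rest, acc =>
      let nr := i + d.1
      let nc := j + d.2
      if 0 ≤ nr ∧ nr < h ∧ 0 ≤ nc ∧ nc < w ∧ pvAt g nr nc = 0
      then pvCheck g h w i j rest (acc ++ [(nr, nc)])
      else none

-- out[p.1][p.2] = 2 ; only reached with 0 ≤ p.1, 0 ≤ p.2 (checked in pvCheck), where toNat is exact
def pvSet2 (out : List (List Int)) (p : Int × Int) : List (List Int) :=
  out.set p.1.toNat ((out.getD p.1.toNat []).set p.2.toNat 2)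

def pvPlace (g : List (List Int)) (h w : Int) (shape : List (Int × Int)) (i : Int)
    (out : List (List Int)) (j : Int) : List (List Int) :=
  match pvCheck g h w i j shape [] with
  | some positions => positions.foldl pvSet2 out
  | none => out

-- body of A's `for comp in two_comps` loop
def pvAStep (g : List (List Int)) (h w : Int) (out : List (List Int))
    (comp : List (Int × Int)) : List (List Int) :=
  match comp with
  | [] => out
  | c0 :: cs =>
      let minr := cs.foldl (fun m q => min m q.1) c0.1
      let minc := cs.foldl (fun m q => min m q.2) c0.2
      let shape : PySem.Set (Int × Int) :=
        PySem.Set.ofList ((c0 :: cs).map (fun q => (q.1 - minr, q.2 - minc)))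
      (PySem.List.pyRange 0 h).foldl (fun out i =>
        (PySem.List.pyRange 0 w).foldl (pvPlace g h w shape i) out) out

def transform (grid_lst : List (List Int)) : List (List Int) :=
  if grid_lst = [] then [] else
    let h : Int := grid_lst.length
    let w : Int := (grid_lst.headD []).length
    let comps := pvComponents grid_lst
    let out0 := grid_lst.map (fun row => PySem.List.slice row none none)
    comps.foldl (pvAStep grid_lst h w) out0

-- ===== PORT B =====
def pvShift (zs : List (Int × Int)) (d : Int × Int) : List (Int × Int) :=
  zs.map (fun q => (q.1 - d.1, q.2 - d.2))

def pvInter (xs ys : List (Int × Int)) : List (Int × Int) :=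
  xs.filter (fun q => q ∈ ys)

-- the set of zero cells of the grid
def pvZeros (g : List (List Int)) (h w : Int) : List (Int × Int) :=
  (PySem.List.pyRange 0 h).flatMap (fun r =>
    (PySem.List.pyRange 0 w).filterMap (fun c =>
      if pvAt g r c = 0 then some (r, c) else none))

-- body of B's `for comp in get_two_components(...)` loop
def pvBStep (zeros : List (Int × Int)) (fill : PySem.Set (Int × Int))
    (comp : List (Int × Int)) : PySem.Set (Int × Int) :=
  match comp with
  | [] => fill
  | c0 :: cs =>
      let r0 := cs.foldl (fun m q => min m q.1) c0.1
      let col0 := cs.foldl (fun m q => min m q.2) c0.2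
      let offs := (c0 :: cs).map (fun q => (q.1 - r0, q.2 - col0))
      let anchors := match offs with
        | [] => []
        | o :: os => os.foldl (fun acc d => pvInter acc (pvShift zeros d)) (pvShift zeros o)
      anchors.foldl (fun fill a =>
        offs.foldl (fun fill d => PySem.Set.add fill (a.1 + d.1, a.2 + d.2)) fill) fill

def transform_alt (grid_lst : List (List Int)) : List (List Int) :=
  if grid_lst = [] then [] else
    let h : Int := grid_lst.length
    let w : Int := (grid_lst.headD []).length
    let zeros := pvZeros grid_lst h w
    let fill := (pvComponents grid_lst).foldl (pvBStep zeros) (PySem.Set.ofList [])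
    grid_lst.mapIdx (fun r row =>
      row.mapIdx (fun c v => if ((r : Int), (c : Int)) ∈ fill then 2 else v))

-- ===== PRECONDITION & SPEC =====
-- Pre_: every row is at least as long as the first row (w = len(grid_lst[0])); on any input with a
-- shorter row the Python A raises IndexError reading grid[i][j], so exactly those are excluded.
def Pre_transform (grid_lst : List (List Int)) : Prop :=
  ∀ row ∈ grid_lst, (grid_lst.headD []).length ≤ row.length
instance (grid_lst : List (List Int)) : Decidable (Pre_transform grid_lst) := by
  unfold Pre_transform; infer_instance

def pvWitness_transform : List (List Int) := [[2, 0], [0, 0]]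

def Spec_transform (grid_lst : List (List Int)) (out : List (List Int)) : Prop :=
  out = transform_alt grid_lst
instance (grid_lst : List (List Int)) (out : List (List Int)) : Decidable (Spec_transform grid_lst out) := by
  unfold Spec_transform; infer_instance

-- ===== CLAIM (what is proved, stated in full; the proofs are below) =====
def Claim_equal_transform : Prop := ∀ (grid_lst : List (List Int)), Dom_transform grid_lst →
  Pre_transform grid_lst → Spec_transform grid_lst (transform grid_lst)

-- ===== LEMMAS AND PROOFS =====

-- an in-bounds zero cell
abbrev pvGood (g : List (List Int)) (p : Int × Int) : Prop :=
  0 ≤ p.1 ∧ p.1 < (g.length : Int) ∧ 0 ≤ p.2 ∧ p.2 < ((g.headD []).length : Int) ∧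
    pvAt g p.1 p.2 = 0

-- every cell of the shape placed at (i, j) lands on an in-bounds zero cell
abbrev pvMatch (g : List (List Int)) (shape : List (Int × Int)) (i j : Int) : Prop :=
  ∀ d ∈ shape, pvGood g (i + d.1, j + d.2)

-- getD-based cell view of a grid
def pvCell (out : List (List Int)) (r c : Nat) : Int := (out.getD r []).getD c 0

-- same row lengths everywhere
def pvSameShape (out g : List (List Int)) : Prop :=
  out.length = g.length ∧ ∀ k : Nat, (out.getD k []).length = (g.getD k []).length

theorem pvSameShape_refl (g : List (List Int)) : pvSameShape g g := ⟨rfl, fun _ => rfl⟩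

theorem pvZeros_mem (g : List (List Int)) (p : Int × Int) :
    p ∈ pvZeros g g.length (g.headD []).length ↔ pvGood g p := by
  cases p with | mk r c =>
  simp only [pvZeros, List.mem_flatMap, List.mem_filterMap, PySem.List.mem_pyRange_one, pvGood]
  constructor
  · rintro ⟨r', ⟨hr0, hr1⟩, c', ⟨hc0, hc1⟩, h⟩
    split at h
    · rename_i hz
      obtain ⟨rfl, rfl⟩ := Prod.mk.inj (Option.some.inj h)
      exact ⟨hr0, hr1, hc0, hc1, hz⟩
    · cases h
  · rintro ⟨h1, h2, h3, h4, h5⟩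
    exact ⟨r, ⟨h1, h2⟩, c, ⟨h3, h4⟩, by simp [h5]⟩

theorem pvShift_mem (zs : List (Int × Int)) (d p : Int × Int) :
    p ∈ pvShift zs d ↔ (p.1 + d.1, p.2 + d.2) ∈ zs := by
  simp only [pvShift, List.mem_map]
  constructor
  · rintro ⟨q, hq, rfl⟩; simpa using hq
  · intro h; exact ⟨(p.1 + d.1, p.2 + d.2), h, by simp⟩

theorem pvInter_mem (xs ys : List (Int × Int)) (p : Int × Int) :
    p ∈ pvInter xs ys ↔ p ∈ xs ∧ p ∈ ys := by
  simp [pvInter, List.mem_filter]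

theorem pvAnchorsAux_mem (zs : List (Int × Int)) (os : List (Int × Int)) :
    ∀ (acc : List (Int × Int)) (a : Int × Int),
      a ∈ os.foldl (fun acc d => pvInter acc (pvShift zs d)) acc ↔
        a ∈ acc ∧ ∀ d ∈ os, (a.1 + d.1, a.2 + d.2) ∈ zs := by
  induction os with
  | nil => intro acc a; simp
  | cons o os ih =>
      intro acc a
      simp only [List.foldl_cons, ih, pvInter_mem, pvShift_mem, List.mem_cons]
      constructor
      · rintro ⟨⟨h1, h2⟩, h3⟩
        exact ⟨h1, fun d hd => hd.elim (fun e => e ▸ h2) (h3 d)⟩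
      · rintro ⟨h1, h2⟩
        exact ⟨⟨h1, h2 o (Or.inl rfl)⟩, fun d hd => h2 d (Or.inr hd)⟩

theorem pvAnchors_mem (zs : List (Int × Int)) (o : Int × Int) (os : List (Int × Int))
    (a : Int × Int) :
    a ∈ os.foldl (fun acc d => pvInter acc (pvShift zs d)) (pvShift zs o) ↔
      ∀ d ∈ o :: os, (a.1 + d.1, a.2 + d.2) ∈ zs := by
  rw [pvAnchorsAux_mem, pvShift_mem]
  simp only [List.mem_cons]
  constructor
  · rintro ⟨h1, h2⟩ d hd
    exact hd.elim (fun e => e ▸ h1) (h2 d)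
  · intro h
    exact ⟨h o (Or.inl rfl), fun d hd => h d (Or.inr hd)⟩

theorem pvMem_foldl_add {β : Type} (xs : List β) (f : β → Int × Int) :
    ∀ (s : PySem.Set (Int × Int)) (p : Int × Int),
      p ∈ xs.foldl (fun s b => PySem.Set.add s (f b)) s ↔ p ∈ s ∨ ∃ b ∈ xs, p = f b := by
  induction xs with
  | nil => intro s p; simp
  | cons x xs ih =>
      intro s p
      rw [List.foldl_cons, ih, PySem.Set.mem_add]
      simp only [List.mem_cons]
      constructor
      · rintro ((h | h) | ⟨b, hb, rfl⟩)
        · exact Or.inl h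
        · exact Or.inr ⟨x, Or.inl rfl, h⟩
        · exact Or.inr ⟨b, Or.inr hb, rfl⟩
      · rintro (h | ⟨b, (rfl | hb), rfl⟩)
        · exact Or.inl (Or.inl h)
        · exact Or.inl (Or.inr rfl)
        · exact Or.inr ⟨b, hb, rfl⟩

theorem pvFill_mem (anchors offs : List (Int × Int)) :
    ∀ (fill : PySem.Set (Int × Int)) (p : Int × Int),
      p ∈ anchors.foldl (fun fill a =>
          offs.foldl (fun fill d => PySem.Set.add fill (a.1 + d.1, a.2 + d.2)) fill) fill ↔
        p ∈ fill ∨ ∃ a ∈ anchors, ∃ d ∈ offs, p = (a.1 + d.1, a.2 + d.2) := by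
  induction anchors with
  | nil => intro fill p; simp
  | cons a as ih =>
      intro fill p
      rw [List.foldl_cons, ih, pvMem_foldl_add]
      simp only [List.mem_cons]
      constructor
      · rintro ((h | ⟨d, hd, rfl⟩) | ⟨a', ha', d, hd, rfl⟩)
        · exact Or.inl h
        · exact Or.inr ⟨a, Or.inl rfl, d, hd, rfl⟩
        · exact Or.inr ⟨a', Or.inr ha', d, hd, rfl⟩
      · rintro (h | ⟨a', (rfl | ha'), d, hd, rfl⟩)
        · exact Or.inl (Or.inl h)
        · exact Or.inl (Or.inr ⟨d, hd, rfl⟩)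
        · exact Or.inr ⟨a', ha', d, hd, rfl⟩

theorem pvFoldlMin_mem (xs : List Int) : ∀ a : Int, xs.foldl min a ∈ a :: xs := by
  induction xs with
  | nil => intro a; simp
  | cons x xs ih =>
      intro a
      simp only [List.foldl_cons]
      rcases List.mem_cons.1 (ih (min a x)) with h | h
      · rcases min_choice a x with e | e
        · exact List.mem_cons.2 (Or.inl (h.trans e))
        · exact List.mem_cons.2 (Or.inr (List.mem_cons.2 (Or.inl (h.trans e))))
      · exact List.mem_cons.2 (Or.inr (List.mem_cons.2 (Or.inr h)))

theorem pvMin_attained {α : Type} (f : α → Int) (c0 : α) (cs : List α) :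
    ∃ q ∈ c0 :: cs, f q = cs.foldl (fun m q => min m (f q)) (f c0) := by
  have h := pvFoldlMin_mem (cs.map f) (f c0)
  rw [List.foldl_map] at h
  rcases List.mem_cons.1 h with e | e
  · exact ⟨c0, List.mem_cons_self, e.symm⟩
  · rcases List.mem_map.1 e with ⟨q, hq, hq2⟩
    exact ⟨q, List.mem_cons_of_mem _ hq, hq2⟩

theorem pvCheck_eq (g : List (List Int)) (h w i j : Int) (offs : List (Int × Int)) :
    ∀ acc : List (Int × Int),
      pvCheck g h w i j offs acc =
        if ∀ d ∈ offs, 0 ≤ i + d.1 ∧ i + d.1 < h ∧ 0 ≤ j + d.2 ∧ j + d.2 < w ∧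
            pvAt g (i + d.1) (j + d.2) = 0
        then some (acc ++ offs.map (fun d => (i + d.1, j + d.2))) else none := by
  induction offs with
  | nil => intro acc; simp [pvCheck]
  | cons d rest ih =>
      intro acc
      by_cases hd : 0 ≤ i + d.1 ∧ i + d.1 < h ∧ 0 ≤ j + d.2 ∧ j + d.2 < w ∧
          pvAt g (i + d.1) (j + d.2) = 0
      · rw [show pvCheck g h w i j (d :: rest) acc
              = pvCheck g h w i j rest (acc ++ [(i + d.1, j + d.2)]) from by
            simp only [pvCheck]; rw [if_pos hd], ih]
        by_cases hr : ∀ d' ∈ rest, 0 ≤ i + d'.1 ∧ i + d'.1 < h ∧ 0 ≤ j + d'.2 ∧ j + d'.2 < w ∧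
            pvAt g (i + d'.1) (j + d'.2) = 0
        · rw [if_pos hr, if_pos (by
            intro d' hd'
            rcases List.mem_cons.1 hd' with rfl | hmem
            · exact hd
            · exact hr d' hmem)]
          simp
        · rw [if_neg hr, if_neg (by
            intro hall
            exact hr (fun d' hd' => hall d' (List.mem_cons_of_mem _ hd')))]
      · rw [show pvCheck g h w i j (d :: rest) acc = none from by
            simp only [pvCheck]; rw [if_neg hd],
          if_neg (fun hall => hd (hall d List.mem_cons_self))]

theorem pvMatch_iff (g : List (List Int)) (shape : List (Int × Int)) (i j : Int) :
    pvMatch g shape i j ↔ ∀ d ∈ shape, 0 ≤ i + d.1 ∧ i + d.1 < (g.length : Int) ∧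
      0 ≤ j + d.2 ∧ j + d.2 < ((g.headD []).length : Int) ∧ pvAt g (i + d.1) (j + d.2) = 0 :=
  Iff.rfl

theorem pvCheck_match (g : List (List Int)) (shape : List (Int × Int)) (i j : Int)
    (hm : pvMatch g shape i j) :
    pvCheck g g.length (g.headD []).length i j shape [] =
      some (shape.map (fun d => (i + d.1, j + d.2))) := by
  rw [pvCheck_eq, if_pos ((pvMatch_iff g shape i j).1 hm)]
  simp

theorem pvCheck_nomatch (g : List (List Int)) (shape : List (Int × Int)) (i j : Int)
    (hm : ¬ pvMatch g shape i j) :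
    pvCheck g g.length (g.headD []).length i j shape [] = none := by
  rw [pvCheck_eq, if_neg (fun hall => hm ((pvMatch_iff g shape i j).2 hall))]

theorem pvSet2_row? (out : List (List Int)) (p : Int × Int) (k : Nat) :
    (pvSet2 out p)[k]? =
      if p.1.toNat = k ∧ k < out.length then some ((out.getD k []).set p.2.toNat 2)
      else out[k]? := by
  simp only [pvSet2, List.getElem?_set]
  by_cases h1 : p.1.toNat = k
  · subst h1
    by_cases h2 : p.1.toNat < out.length
    · rw [if_pos rfl, if_pos h2, if_pos ⟨rfl, h2⟩]
    · rw [if_pos rfl, if_neg h2, if_neg (fun h => h2 h.2)]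
      exact (List.getElem?_eq_none (by omega)).symm
  · rw [if_neg h1, if_neg (fun h => h1 h.1)]

theorem pvSet2_shape (out g : List (List Int)) (p : Int × Int) (hs : pvSameShape out g) :
    pvSameShape (pvSet2 out p) g := by
  obtain ⟨h1, h2⟩ := hs
  refine ⟨by simpa [pvSet2] using h1, fun k => ?_⟩
  rw [List.getD_eq_getElem?_getD, pvSet2_row?]
  by_cases h : p.1.toNat = k ∧ k < out.length
  · rw [if_pos h]
    simpa using h2 k
  · rw [if_neg h, ← List.getD_eq_getElem?_getD]
    exact h2 k

theorem pvSet2_cell (out : List (List Int)) (p : Int × Int) (hp1 : 0 ≤ p.1) (hp2 : 0 ≤ p.2)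
    (r c : Nat) :
    pvCell (pvSet2 out p) r c =
      if (r : Int) = p.1 ∧ (c : Int) = p.2 ∧ r < out.length ∧ c < (out.getD r []).length then 2
      else pvCell out r c := by
  have hrow : (pvSet2 out p).getD r [] =
      if p.1.toNat = r ∧ r < out.length then (out.getD r []).set p.2.toNat 2
      else out.getD r [] := by
    rw [List.getD_eq_getElem?_getD, pvSet2_row?]
    split
    · simp
    · rw [← List.getD_eq_getElem?_getD]
  simp only [pvCell, hrow]
  by_cases h1 : p.1.toNat = r ∧ r < out.length
  · rw [if_pos h1]
    have hr : (r : Int) = p.1 := by omega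
    rw [List.getD_eq_getElem?_getD, List.getElem?_set]
    by_cases h2 : p.2.toNat = c
    · by_cases h3 : c < (out.getD r []).length
      · rw [if_pos h2, if_pos (by omega : p.2.toNat < (out.getD r []).length),
          if_pos ⟨hr, by omega, h1.2, h3⟩]
        simp
      · rw [if_pos h2, if_neg (by omega : ¬ p.2.toNat < (out.getD r []).length),
          if_neg (fun h => h3 h.2.2.2)]
        simp only [Option.getD_none]
        exact (List.getD_eq_default _ _ (by omega : (out.getD r []).length ≤ c)).symm
    · rw [if_neg h2, ← List.getD_eq_getElem?_getD,
        if_neg (fun h => h2 (by omega))]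
  · rw [if_neg h1, if_neg (fun h => h1 ⟨by omega, h.2.2.1⟩)]

theorem pvFoldlSet2_shape (ps : List (Int × Int)) :
    ∀ (out g : List (List Int)), pvSameShape out g → pvSameShape (ps.foldl pvSet2 out) g := by
  induction ps with
  | nil => intro out g hs; exact hs
  | cons p ps ih => intro out g hs; exact ih _ _ (pvSet2_shape out g p hs)

theorem pvFoldlSet2_cell (ps : List (Int × Int)) :
    ∀ (out : List (List Int)),
      (∀ p ∈ ps, 0 ≤ p.1 ∧ 0 ≤ p.2 ∧ p.1.toNat < out.length ∧
        p.2.toNat < (out.getD p.1.toNat []).length) →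
      ∀ r c : Nat,
        pvCell (ps.foldl pvSet2 out) r c =
          if ((r : Int), (c : Int)) ∈ ps then 2 else pvCell out r c := by
  induction ps with
  | nil => intro out _ r c; simp
  | cons p ps ih =>
      intro out hin r c
      obtain ⟨hp1, hp2, hp3, hp4⟩ := hin p List.mem_cons_self
      have hsh : pvSameShape (pvSet2 out p) out := pvSet2_shape out out p (pvSameShape_refl out)
      have hin' : ∀ q ∈ ps, 0 ≤ q.1 ∧ 0 ≤ q.2 ∧ q.1.toNat < (pvSet2 out p).length ∧
          q.2.toNat < ((pvSet2 out p).getD q.1.toNat []).length := by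
        intro q hq
        obtain ⟨a, b, cc, d⟩ := hin q (List.mem_cons_of_mem _ hq)
        exact ⟨a, b, by rw [hsh.1]; exact cc, by rw [hsh.2]; exact d⟩
      rw [List.foldl_cons, ih _ hin' r c, pvSet2_cell out p hp1 hp2 r c]
      by_cases hmem : ((r : Int), (c : Int)) ∈ ps
      · rw [if_pos hmem, if_pos (List.mem_cons_of_mem _ hmem)]
      · rw [if_neg hmem]
        by_cases heq : ((r : Int), (c : Int)) = p
        · have h1 : (r : Int) = p.1 := by rw [← heq]
          have h2 : (c : Int) = p.2 := by rw [← heq]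
          rw [if_pos ⟨h1, h2, by omega, by
              have : p.1.toNat = r := by omega
              rw [← this]
              have : p.2.toNat = c := by omega
              omega⟩,
            if_pos (List.mem_cons.2 (Or.inl heq))]
        · rw [if_neg (fun h => heq (by
              obtain ⟨h1, h2, _⟩ := h
              exact Prod.ext h1 h2)),
            if_neg (by
              intro h
              rcases List.mem_cons.1 h with h | h
              · exact heq h
              · exact hmem h)]

theorem pvGood_inRange (g out : List (List Int)) (hpre : Pre_transform g)
    (hs : pvSameShape out g) (p : Int × Int) (hg : pvGood g p) :
    0 ≤ p.1 ∧ 0 ≤ p.2 ∧ p.1.toNat < out.length ∧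
      p.2.toNat < (out.getD p.1.toNat []).length := by
  obtain ⟨h1, h2, h3, h4, _⟩ := hg
  have hk : p.1.toNat < g.length := by omega
  have hmem : g.getD p.1.toNat [] ∈ g := by
    rw [List.getD_eq_getElem g [] hk]; exact List.getElem_mem hk
  have hle := hpre _ hmem
  refine ⟨h1, h3, by rw [hs.1]; exact hk, ?_⟩
  rw [hs.2]
  omega

theorem pvInner_char (g : List (List Int)) (hpre : Pre_transform g) (shape : List (Int × Int))
    (i : Int) (L : List Int) :
    ∀ out : List (List Int), pvSameShape out g →
      pvSameShape (L.foldl (pvPlace g g.length (g.headD []).length shape i) out) g ∧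
      ∀ r c : Nat,
        pvCell (L.foldl (pvPlace g g.length (g.headD []).length shape i) out) r c =
          if ∃ j ∈ L, pvMatch g shape i j ∧
              ∃ d ∈ shape, (i + d.1, j + d.2) = ((r : Int), (c : Int))
          then 2 else pvCell out r c := by
  induction L with
  | nil => intro out hs; exact ⟨hs, fun r c => by simp⟩
  | cons j L ih =>
      intro out hs
      rw [List.foldl_cons]
      by_cases hm : pvMatch g shape i j
      · have hplace : pvPlace g g.length (g.headD []).length shape i out j =
            (shape.map (fun d => (i + d.1, j + d.2))).foldl pvSet2 out := by
          simp only [pvPlace, pvCheck_match g shape i j hm]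
        have hin : ∀ p ∈ shape.map (fun d => (i + d.1, j + d.2)),
            0 ≤ p.1 ∧ 0 ≤ p.2 ∧ p.1.toNat < out.length ∧
              p.2.toNat < (out.getD p.1.toNat []).length := by
          intro p hp
          rcases List.mem_map.1 hp with ⟨d, hd, rfl⟩
          exact pvGood_inRange g out hpre hs _ (hm d hd)
        have hs' : pvSameShape (pvPlace g g.length (g.headD []).length shape i out j) g := by
          rw [hplace]; exact pvFoldlSet2_shape _ _ _ hs
        obtain ⟨ihs, ihc⟩ := ih _ hs'
        refine ⟨ihs, fun r c => ?_⟩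
        rw [ihc r c, hplace, pvFoldlSet2_cell _ _ hin r c]
        by_cases hL : ∃ j' ∈ L, pvMatch g shape i j' ∧
            ∃ d ∈ shape, (i + d.1, j' + d.2) = ((r : Int), (c : Int))
        · rw [if_pos hL, if_pos (by
            obtain ⟨j', hj', hc'⟩ := hL
            exact ⟨j', List.mem_cons_of_mem _ hj', hc'⟩)]
        · rw [if_neg hL]
          by_cases hmem : ((r : Int), (c : Int)) ∈ shape.map (fun d => (i + d.1, j + d.2))
          · rw [if_pos hmem, if_pos ⟨j, List.mem_cons_self, hm, List.mem_map.1 hmem⟩]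
          · rw [if_neg hmem, if_neg (by
              rintro ⟨j', hj', hm', d, hd, he⟩
              rcases List.mem_cons.1 hj' with rfl | hj'
              · exact hmem (List.mem_map.2 ⟨d, hd, he⟩)
              · exact hL ⟨j', hj', hm', d, hd, he⟩)]
      · have hplace : pvPlace g g.length (g.headD []).length shape i out j = out := by
          simp only [pvPlace, pvCheck_nomatch g shape i j hm]
        rw [hplace]
        obtain ⟨ihs, ihc⟩ := ih out hs
        refine ⟨ihs, fun r c => ?_⟩
        rw [ihc r c]
        by_cases hL : ∃ j' ∈ L, pvMatch g shape i j' ∧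
            ∃ d ∈ shape, (i + d.1, j' + d.2) = ((r : Int), (c : Int))
        · rw [if_pos hL, if_pos (by
            obtain ⟨j', hj', hc'⟩ := hL
            exact ⟨j', List.mem_cons_of_mem _ hj', hc'⟩)]
        · rw [if_neg hL, if_neg (by
            rintro ⟨j', hj', hm', d, hd, he⟩
            rcases List.mem_cons.1 hj' with rfl | hj'
            · exact hm hm'
            · exact hL ⟨j', hj', hm', d, hd, he⟩)]

theorem pvOuter_char (g : List (List Int)) (hpre : Pre_transform g) (shape : List (Int × Int))
    (L : List Int) :
    ∀ out : List (List Int), pvSameShape out g →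
      pvSameShape (L.foldl (fun out i => (PySem.List.pyRange 0 (g.headD []).length).foldl
          (pvPlace g g.length (g.headD []).length shape i) out) out) g ∧
      ∀ r c : Nat,
        pvCell (L.foldl (fun out i => (PySem.List.pyRange 0 (g.headD []).length).foldl
            (pvPlace g g.length (g.headD []).length shape i) out) out) r c =
          if ∃ i ∈ L, ∃ j ∈ PySem.List.pyRange 0 (((g.headD []).length : Nat) : Int),
              pvMatch g shape i j ∧
              ∃ d ∈ shape, (i + d.1, j + d.2) = ((r : Int), (c : Int))
          then 2 else pvCell out r c := by
  induction L with
  | nil => intro out hs; exact ⟨hs, fun r c => by simp⟩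
  | cons i L ih =>
      intro out hs
      rw [List.foldl_cons]
      obtain ⟨hs', hc'⟩ := pvInner_char g hpre shape i (PySem.List.pyRange 0 (g.headD []).length) out hs
      obtain ⟨ihs, ihc⟩ := ih _ hs'
      refine ⟨ihs, fun r c => ?_⟩
      rw [ihc r c, hc' r c]
      by_cases hL : ∃ i' ∈ L, ∃ j ∈ PySem.List.pyRange 0 (((g.headD []).length : Nat) : Int),
          pvMatch g shape i' j ∧ ∃ d ∈ shape, (i' + d.1, j + d.2) = ((r : Int), (c : Int))
      · rw [if_pos hL, if_pos (by
          obtain ⟨i', hi', hc''⟩ := hL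
          exact ⟨i', List.mem_cons_of_mem _ hi', hc''⟩)]
      · rw [if_neg hL]
        by_cases hj : ∃ j ∈ PySem.List.pyRange 0 (((g.headD []).length : Nat) : Int),
            pvMatch g shape i j ∧ ∃ d ∈ shape, (i + d.1, j + d.2) = ((r : Int), (c : Int))
        · rw [if_pos hj, if_pos ⟨i, List.mem_cons_self, hj⟩]
        · rw [if_neg hj, if_neg (by
            rintro ⟨i', hi', hrest⟩
            rcases List.mem_cons.1 hi' with rfl | hi'
            · exact hj hrest
            · exact hL ⟨i', hi', hrest⟩)]

theorem pvOfList_mem (offs : List (Int × Int)) (d : Int × Int) :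
    d ∈ PySem.Set.ofList offs ↔ d ∈ offs := PySem.Set.mem_ofList offs d

theorem pvMatch_ofList (g : List (List Int)) (offs : List (Int × Int)) (i j : Int) :
    pvMatch g (PySem.Set.ofList offs) i j ↔ pvMatch g offs i j := by
  constructor <;> intro h d hd
  · exact h d ((pvOfList_mem offs d).2 hd)
  · exact h d ((pvOfList_mem offs d).1 hd)

theorem pvBridge (g : List (List Int)) (o : Int × Int) (os : List (Int × Int))
    (hfst : ∃ d ∈ o :: os, d.1 = 0) (hsnd : ∃ d ∈ o :: os, d.2 = 0) (rc : Int × Int) :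
    (∃ i ∈ PySem.List.pyRange 0 ((g.length : Nat) : Int),
      ∃ j ∈ PySem.List.pyRange 0 (((g.headD []).length : Nat) : Int),
        pvMatch g (PySem.Set.ofList (o :: os)) i j ∧
        ∃ d ∈ PySem.Set.ofList (o :: os), (i + d.1, j + d.2) = rc) ↔
    (∃ a ∈ os.foldl (fun acc d => pvInter acc
        (pvShift (pvZeros g g.length (g.headD []).length) d))
        (pvShift (pvZeros g g.length (g.headD []).length) o),
      ∃ d ∈ o :: os, rc = (a.1 + d.1, a.2 + d.2)) := by
  constructor
  · rintro ⟨i, hi, j, hj, hm, d, hd, he⟩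
    refine ⟨(i, j), ?_, d, (pvOfList_mem _ d).1 hd, he.symm⟩
    rw [pvAnchors_mem]
    intro d' hd'
    exact (pvZeros_mem g _).2 ((pvMatch_ofList g _ i j).1 hm d' hd')
  · rintro ⟨a, ha, d, hd, he⟩
    rw [pvAnchors_mem] at ha
    have hall : ∀ d' ∈ o :: os, pvGood g (a.1 + d'.1, a.2 + d'.2) :=
      fun d' hd' => (pvZeros_mem g _).1 (ha d' hd')
    obtain ⟨d0, hd0, h0⟩ := hfst
    obtain ⟨d1, hd1, h1⟩ := hsnd
    have hg0 := hall d0 hd0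
    have hg1 := hall d1 hd1
    rw [h0] at hg0
    rw [h1] at hg1
    refine ⟨a.1, PySem.List.mem_pyRange_one.2 ⟨by have := hg0.1; omega, by have := hg0.2.1; omega⟩,
      a.2, PySem.List.mem_pyRange_one.2 ⟨by have := hg1.2.2.1; omega, by have := hg1.2.2.2.1; omega⟩,
      (pvMatch_ofList g _ a.1 a.2).2 (fun d' hd' => hall d' hd'),
      d, (pvOfList_mem _ d).2 hd, he.symm⟩

theorem pvStep_char (g : List (List Int)) (hpre : Pre_transform g)
    (out : List (List Int)) (fill : PySem.Set (Int × Int)) (comp : List (Int × Int))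
    (hs : pvSameShape out g)
    (hcell : ∀ r c : Nat, r < g.length → c < (g.getD r []).length →
      pvCell out r c = if ((r : Int), (c : Int)) ∈ fill then 2 else pvCell g r c) :
    pvSameShape (pvAStep g g.length (g.headD []).length out comp) g ∧
    ∀ r c : Nat, r < g.length → c < (g.getD r []).length →
      pvCell (pvAStep g g.length (g.headD []).length out comp) r c =
        if ((r : Int), (c : Int)) ∈ pvBStep (pvZeros g g.length (g.headD []).length) fill comp
        then 2 else pvCell g r c := by
  cases comp with
  | nil => exact ⟨hs, hcell⟩
  | cons c0 cs =>
      simp only [pvAStep, pvBStep, List.map_cons]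
      obtain ⟨hsA, hcA⟩ := pvOuter_char g hpre
        (PySem.Set.ofList ((c0.1 - cs.foldl (fun m q => min m q.1) c0.1,
            c0.2 - cs.foldl (fun m q => min m q.2) c0.2) ::
          cs.map (fun q => (q.1 - cs.foldl (fun m q => min m q.1) c0.1,
            q.2 - cs.foldl (fun m q => min m q.2) c0.2))))
        (PySem.List.pyRange 0 g.length) out hs
      refine ⟨hsA, fun r c hr hc => ?_⟩
      obtain ⟨q0, hq0, he0⟩ := pvMin_attained (fun q => q.1) c0 cs
      obtain ⟨q1, hq1, he1⟩ := pvMin_attained (fun q => q.2) c0 cs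
      have hfst : ∃ d ∈ (c0.1 - cs.foldl (fun m q => min m q.1) c0.1,
            c0.2 - cs.foldl (fun m q => min m q.2) c0.2) ::
          cs.map (fun q => (q.1 - cs.foldl (fun m q => min m q.1) c0.1,
            q.2 - cs.foldl (fun m q => min m q.2) c0.2)), d.1 = 0 := by
        rcases List.mem_cons.1 hq0 with rfl | hq0'
        · exact ⟨_, List.mem_cons_self, by simp [← he0]⟩
        · exact ⟨_, List.mem_cons_of_mem _ (List.mem_map.2 ⟨q0, hq0', rfl⟩), by simp [← he0]⟩
      have hsnd : ∃ d ∈ (c0.1 - cs.foldl (fun m q => min m q.1) c0.1,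
            c0.2 - cs.foldl (fun m q => min m q.2) c0.2) ::
          cs.map (fun q => (q.1 - cs.foldl (fun m q => min m q.1) c0.1,
            q.2 - cs.foldl (fun m q => min m q.2) c0.2)), d.2 = 0 := by
        rcases List.mem_cons.1 hq1 with rfl | hq1'
        · exact ⟨_, List.mem_cons_self, by simp [← he1]⟩
        · exact ⟨_, List.mem_cons_of_mem _ (List.mem_map.2 ⟨q1, hq1', rfl⟩), by simp [← he1]⟩
      have hbridge := pvBridge g _ _ hfst hsnd ((r : Int), (c : Int))
      rw [hcA r c]
      simp only [pvFill_mem, ← hbridge]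
      split_ifs with h1 h2 h3
      · rfl
      · exact absurd (Or.inr h1) h2
      · rw [hcell r c hr hc, if_pos (h3.resolve_right h1)]
      · rw [hcell r c hr hc, if_neg (fun hf => h3 (Or.inl hf))]

theorem pvMain (g : List (List Int)) (hpre : Pre_transform g)
    (comps : List (List (Int × Int))) :
    ∀ (out : List (List Int)) (fill : PySem.Set (Int × Int)),
      pvSameShape out g →
      (∀ r c : Nat, r < g.length → c < (g.getD r []).length →
        pvCell out r c = if ((r : Int), (c : Int)) ∈ fill then 2 else pvCell g r c) →
      pvSameShape (comps.foldl (pvAStep g g.length (g.headD []).length) out) g ∧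
      ∀ r c : Nat, r < g.length → c < (g.getD r []).length →
        pvCell (comps.foldl (pvAStep g g.length (g.headD []).length) out) r c =
          if ((r : Int), (c : Int)) ∈
              comps.foldl (pvBStep (pvZeros g g.length (g.headD []).length)) fill then 2
          else pvCell g r c := by
  induction comps with
  | nil => intro out fill hs hc; exact ⟨hs, hc⟩
  | cons comp comps ih =>
      intro out fill hs hc
      rw [List.foldl_cons, List.foldl_cons]
      obtain ⟨hs', hc'⟩ := pvStep_char g hpre out fill comp hs hc
      exact ih _ _ hs' hc'

theorem pvSliceMap (g : List (List Int)) :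
    g.map (fun row => PySem.List.slice row none none) = g := by
  simp [PySem.List.slice]

-- ===== VERDICT (by name: the statement is the Claim_ definition above) =====
theorem transform_spec : Claim_equal_transform := by
  intro g _ hpre
  unfold Spec_transform
  by_cases hg : g = []
  · subst hg; rfl
  · obtain ⟨hsA, hcA⟩ := pvMain g hpre (pvComponents g)
      (g.map (fun row => PySem.List.slice row none none))
      (PySem.Set.ofList [])
      (by rw [pvSliceMap]; exact pvSameShape_refl g)
      (by
        intro r c hr hc
        rw [pvSliceMap, if_neg (fun h => by simpa using (pvOfList_mem [] _).1 h)])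
    simp only [transform, transform_alt, hg, if_false]
    refine List.ext_getElem (by rw [hsA.1, List.length_mapIdx]) ?_
    intro n h1 h2
    have hn : n < g.length := by rw [hsA.1] at h1; exact h1
    have hrowlen : (((pvComponents g).foldl (pvAStep g g.length (g.headD []).length)
        (g.map (fun row => PySem.List.slice row none none)))[n]'h1).length = (g[n]'hn).length := by
      have := hsA.2 n
      rw [List.getD_eq_getElem _ [] h1, List.getD_eq_getElem _ [] hn] at this
      exact this
    refine List.ext_getElem (by rw [hrowlen]; simp [List.getElem_mapIdx]) ?_
    intro m hm1 hm2
    have hmg : m < (g[n]'hn).length := by rw [hrowlen] at hm1; exact hm1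
    have hcell := hcA n m hn (by rw [List.getD_eq_getElem _ [] hn]; exact hmg)
    rw [pvCell, pvCell, List.getD_eq_getElem _ [] h1, List.getD_eq_getElem _ [] hn,
      List.getD_eq_getElem _ (0 : Int) hm1, List.getD_eq_getElem _ (0 : Int) hmg] at hcell
    rw [hcell]
    simp [List.getElem_mapIdx]
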